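-- pv_equiv track=rewrite | github.com/ZhangHanbo/Visual-Manipulation-Relationship-Network-Pytorch | model/utils/crf_utils.py | decode
-- ===== SOURCE A (Python) =====
-- def decode(idx_target, obj_num_img):
--     idx = 0
--     for i in range(obj_num_img):
--         for j in range(i + 1, obj_num_img):
--             if idx == idx_target:
--                 return i, j
--             idx += 1
--             if idx == idx_target:
--                 return j, i
--             idx += 1
-- ===== SOURCE B (Python) =====
-- def decode(idx_target, obj_num_img):
--     n = obj_num_img
--     t = idx_target
--     if n < 2 or t < 0 or t >= n * (n - 1):
--         return None
--     i = 0
--     while t >= 2 * (n - 1 - i):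
--         t -= 2 * (n - 1 - i)
--         i += 1
--     j = i + 1 + t // 2
--     return (i, j) if t % 2 == 0 else (j, i)
-- ===== Notes on version B (the rewrite author's own statement) =====
-- stated objective: faster
-- what changed: Replaces the nested enumeration of all ordered pairs (counting one index at a time up to idx_target) by an arithmetic row search: a single loop subtracts whole-row pair counts 2*(n-1-i) to find the first index, then computes the second index and the orientation from the remainder's quotient and parity.
import Mathlib
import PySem

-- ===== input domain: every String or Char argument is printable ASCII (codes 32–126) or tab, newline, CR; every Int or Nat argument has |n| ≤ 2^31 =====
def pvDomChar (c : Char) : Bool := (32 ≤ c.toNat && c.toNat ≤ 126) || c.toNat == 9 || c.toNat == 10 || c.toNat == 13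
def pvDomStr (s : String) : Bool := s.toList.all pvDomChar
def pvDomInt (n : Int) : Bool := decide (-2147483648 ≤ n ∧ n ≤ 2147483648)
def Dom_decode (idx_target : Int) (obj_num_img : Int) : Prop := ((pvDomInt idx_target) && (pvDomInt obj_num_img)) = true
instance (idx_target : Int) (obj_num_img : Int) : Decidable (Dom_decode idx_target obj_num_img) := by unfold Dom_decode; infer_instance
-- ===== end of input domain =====

-- B replaces A's pair-by-pair nested enumeration with an arithmetic row search (faster in a timing run).

-- ===== PORT A =====
-- inner 'for j in range(i+1, n)' loop: returns (result, final idx)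
def rowLoop (t i : Int) : List Int → Int → Option (Int × Int) × Int
  | [], idx => (none, idx)
  | j :: js, idx =>
    if idx = t then (some (i, j), idx)
    else if idx + 1 = t then (some (j, i), idx + 1)
    else rowLoop t i js (idx + 2)

-- outer 'for i in range(n)' loop
def outerLoop (t n : Int) : List Int → Int → Option (Int × Int)
  | [], _ => none
  | i :: is, idx =>
    match rowLoop t i (PySem.List.pyRange (i + 1) n 1) idx with
    | (some r, _) => some r
    | (none, idx') => outerLoop t n is idx'

def decode (idx_target : Int) (obj_num_img : Int) : Option (Int × Int) :=
  outerLoop idx_target obj_num_img (PySem.List.pyRange 0 obj_num_img 1) 0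

-- ===== PORT B =====
-- 'while t >= 2*(n-1-i)' loop; fuel n.toNat bounds the ≤ n-1 iterations
def altGo (n : Int) : Nat → Int → Int → Option (Int × Int)
  | 0, _, _ => none
  | fuel + 1, i, t =>
    if t < 2 * (n - 1 - i) then
      let j := i + 1 + PySem.Int.floordiv t 2
      if PySem.Int.mod t 2 = 0 then some (i, j) else some (j, i)
    else altGo n fuel (i + 1) (t - 2 * (n - 1 - i))

def decode_alt (idx_target : Int) (obj_num_img : Int) : Option (Int × Int) :=
  if obj_num_img < 2 ∨ idx_target < 0 ∨ obj_num_img * (obj_num_img - 1) ≤ idx_target then none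
  else altGo obj_num_img obj_num_img.toNat 0 idx_target

-- ===== PRECONDITION & SPEC =====
def Spec_decode (idx_target : Int) (obj_num_img : Int) (out : Option (Int × Int)) : Prop := out = decode_alt idx_target obj_num_img
instance (idx_target : Int) (obj_num_img : Int) (out : Option (Int × Int)) : Decidable (Spec_decode idx_target obj_num_img out) := by unfold Spec_decode; infer_instance

-- ===== CLAIM (what is proved, stated in full; the proofs are below) =====
def Claim_equal_decode : Prop := ∀ (idx_target : Int) (obj_num_img : Int), Dom_decode idx_target obj_num_img → Spec_decode idx_target obj_num_img (decode idx_target obj_num_img)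

-- ===== LEMMAS AND PROOFS =====

theorem rowLoop_none (t i n : Int) : ∀ (k : Nat) (a idx : Int), (n - a).toNat = k →
    (t < idx ∨ idx + 2 * (n - a) ≤ t) →
    rowLoop t i (PySem.List.pyRange a n 1) idx = (none, idx + 2 * (n - a).toNat) := by
  intro k
  induction k with
  | zero =>
    intro a idx hk _
    rw [PySem.List.pyRange_one_eq_nil (by omega)]
    simp [rowLoop]; omega
  | succ k ih =>
    intro a idx hk hout
    have ha : a < n := by omega
    rw [PySem.List.pyRange_one_cons ha]
    simp only [rowLoop]
    rw [if_neg (by omega), if_neg (by omega)]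
    rw [ih (a + 1) (idx + 2) (by omega) (by omega)]
    simp only [Prod.mk.injEq]
    exact ⟨trivial, by omega⟩

theorem rowLoop_some (t i n : Int) : ∀ (k : Nat) (a idx : Int), (n - a).toNat = k →
    idx ≤ t → t < idx + 2 * (n - a) →
    (rowLoop t i (PySem.List.pyRange a n 1) idx).1 =
      some (if PySem.Int.mod (t - idx) 2 = 0
            then (i, a + PySem.Int.floordiv (t - idx) 2)
            else (a + PySem.Int.floordiv (t - idx) 2, i)) := by
  intro k
  induction k with
  | zero => intro a idx hk h1 h2; omega
  | succ k ih =>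
    intro a idx hk h1 h2
    have ha : a < n := by omega
    rw [PySem.List.pyRange_one_cons ha]
    simp only [rowLoop]
    rw [PySem.Int.floordiv_eq_ediv_of_pos (a := t - idx) (by omega),
        PySem.Int.mod_eq_emod_of_pos (a := t - idx) (by omega)]
    by_cases h0 : idx = t
    · rw [if_pos h0]
      have : t - idx = 0 := by omega
      simp [h0.symm]
    · rw [if_neg h0]
      by_cases h1' : idx + 1 = t
      · rw [if_pos h1']
        have he : t - idx = 1 := by omega
        rw [he]; norm_num
      · rw [if_neg h1']
        rw [ih (a + 1) (idx + 2) (by omega) (by omega) (by omega)]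
        rw [PySem.Int.floordiv_eq_ediv_of_pos (a := t - (idx + 2)) (by omega),
            PySem.Int.mod_eq_emod_of_pos (a := t - (idx + 2)) (by omega)]
        have hm : (t - (idx + 2)) % 2 = (t - idx) % 2 := by omega
        have hd : a + 1 + (t - (idx + 2)) / 2 = a + (t - idx) / 2 := by omega
        rw [hm, hd]

theorem outer_eq_altGo (t n : Int) : ∀ (k : Nat) (i idx : Int), (n - i).toNat = k → idx ≤ t →
    outerLoop t n (PySem.List.pyRange i n 1) idx = altGo n k i (t - idx) := by
  intro k
  induction k with
  | zero =>
    intro i idx hk _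
    rw [PySem.List.pyRange_one_eq_nil (by omega)]
    rfl
  | succ k ih =>
    intro i idx hk hle
    have hi : i < n := by omega
    rw [PySem.List.pyRange_one_cons hi]
    simp only [outerLoop, altGo]
    by_cases hin : t < idx + 2 * (n - (i + 1))
    · rw [if_pos (by omega)]
      have hs := rowLoop_some t i n (n - (i + 1)).toNat (i + 1) idx rfl hle hin
      rcases hEq : rowLoop t i (PySem.List.pyRange (i + 1) n 1) idx with ⟨res, idx'⟩
      rw [hEq] at hs; simp only at hs
      rw [hs]
      split_ifs <;> rfl
    · rw [if_neg (by omega)]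
      rw [rowLoop_none t i n (n - (i + 1)).toNat (i + 1) idx rfl (by omega)]
      simp only
      rw [ih (i + 1) (idx + 2 * (n - (i + 1)).toNat) (by omega) (by omega)]
      congr 1
      omega

theorem altGo_big (n : Int) : ∀ (k : Nat) (i t : Int), (n - i).toNat = k →
    (n - i) * (n - i - 1) ≤ t → 0 ≤ t → altGo n k i t = none := by
  intro k
  induction k with
  | zero => intro i t _ _ _; rfl
  | succ k ih =>
    intro i t hk hbig ht
    have hi : i < n := by omega
    simp only [altGo]
    rw [if_neg (by nlinarith)]
    refine ih (i + 1) (t - 2 * (n - 1 - i)) (by omega) (by nlinarith) (by nlinarith)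

theorem outer_neg (t n : Int) : ∀ (k : Nat) (i idx : Int), (n - i).toNat = k → t < idx →
    outerLoop t n (PySem.List.pyRange i n 1) idx = none := by
  intro k
  induction k with
  | zero =>
    intro i idx hk _
    rw [PySem.List.pyRange_one_eq_nil (by omega)]; rfl
  | succ k ih =>
    intro i idx hk hlt
    have hi : i < n := by omega
    rw [PySem.List.pyRange_one_cons hi]
    simp only [outerLoop]
    rw [rowLoop_none t i n (n - (i + 1)).toNat (i + 1) idx rfl (Or.inl hlt)]
    exact ih (i + 1) _ (by omega) (by omega)

-- ===== VERDICT (by name: the statement is the Claim_ definition above) =====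
theorem decode_spec : Claim_equal_decode := by
  intro t n _
  unfold Spec_decode decode decode_alt
  by_cases ht : t < 0
  · rw [outer_neg t n n.toNat 0 0 (by omega) ht, if_pos (by omega)]
  · replace ht : 0 ≤ t := by omega
    rw [outer_eq_altGo t n n.toNat 0 0 (by omega) ht]
    simp only [sub_zero]
    by_cases hg : n < 2 ∨ t < 0 ∨ n * (n - 1) ≤ t
    · rw [if_pos hg]
      rcases hg with h | h | h
      · by_cases hn : n ≤ 0
        · have : n.toNat = 0 := by omega
          rw [this]; rfl
        · exact altGo_big n n.toNat 0 t (by omega) (by nlinarith) ht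

      · omega
      · exact altGo_big n n.toNat 0 t (by omega) (by simpa using h) ht
    · rw [if_neg hg]
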